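-- pv_equiv track=rewrite | github.com/jonathonreilly/toy-physics | scripts/frontier_teleportation_protocol.py | encoded_taste_indices
-- ===== SOURCE A (Python) =====
-- def coordinate_index(coords: tuple[int, ...], side: int) -> int:
--     """Row-major lattice index matching the CHSH lane conventions."""
--     index = 0
--     for coord in coords:
--         index = index * side + coord
--     return index
--
-- def encoded_taste_indices(
--     dim: int = 3,
--     side: int = 4,
--     cell: tuple[int, int, int] = (0, 0, 0),
--     logical_axis: int = 2,
-- ) -> tuple[int, int]:
--     """Return site indices for |0_L>, |1_L> in one fixed taste axis."""
--     indices: list[int] = []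
--     for bit in (0, 1):
--         eta = [0] * dim
--         eta[logical_axis] = bit
--         coords = tuple(2 * cell[axis] + eta[axis] for axis in range(dim))
--         indices.append(coordinate_index(coords, side))
--     return indices[0], indices[1]
-- ===== SOURCE B (Python) =====
-- def coordinate_index(coords: tuple[int, ...], side: int) -> int:
--     """Row-major lattice index matching the CHSH lane conventions."""
--     index = 0
--     for coord in coords:
--         index = index * side + coord
--     return index
--
-- def encoded_taste_indices(
--     dim: int = 3,
--     side: int = 4,
--     cell: tuple[int, int, int] = (0, 0, 0),
--     logical_axis: int = 2,
-- ) -> tuple[int, int]: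
--     """Return site indices for |0_L>, |1_L> in one fixed taste axis."""
--     eta = [0] * dim
--     eta[logical_axis] = 1
--     base = coordinate_index(tuple(2 * cell[axis] for axis in range(dim)), side)
--     delta = coordinate_index(tuple(eta), side)
--     return base, base + delta
-- ===== Notes on version B (the rewrite author's own statement) =====
-- stated objective: simpler
-- what changed: Exploits linearity of the row-major index: computes the base index of the 2*cell corner once and adds the index of the unit taste vector, instead of looping over both logical bits and rebuilding the coordinate tuple twice.
import Mathlib
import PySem

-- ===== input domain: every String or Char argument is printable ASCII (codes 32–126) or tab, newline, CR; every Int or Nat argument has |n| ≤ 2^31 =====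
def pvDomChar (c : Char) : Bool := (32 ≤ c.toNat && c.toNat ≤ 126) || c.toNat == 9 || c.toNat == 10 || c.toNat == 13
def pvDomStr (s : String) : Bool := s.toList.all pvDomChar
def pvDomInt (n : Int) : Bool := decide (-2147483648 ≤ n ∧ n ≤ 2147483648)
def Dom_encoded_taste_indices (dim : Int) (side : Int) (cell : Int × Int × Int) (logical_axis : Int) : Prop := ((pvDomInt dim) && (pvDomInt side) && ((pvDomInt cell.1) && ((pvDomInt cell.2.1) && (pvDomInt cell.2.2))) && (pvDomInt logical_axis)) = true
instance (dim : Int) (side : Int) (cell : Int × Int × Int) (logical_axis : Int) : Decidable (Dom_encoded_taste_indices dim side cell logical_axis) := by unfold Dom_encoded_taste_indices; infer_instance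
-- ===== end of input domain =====

-- B computes the base row-major index of the 2*cell corner once and adds the index of the
-- unit taste vector (linearity), instead of A's loop over both logical bits; objective: simpler.


-- ===== PORT A =====
-- cell[axis]: exact for axis ∈ {0,1,2}; Pre_ keeps dim ≤ 3 so axis never exceeds 2
def cellGet (cell : Int × Int × Int) (axis : Int) : Int :=
  if axis = 0 then cell.1 else if axis = 1 then cell.2.1 else cell.2.2

def coordinate_index (coords : List Int) (side : Int) : Int :=
  coords.foldl (fun index coord => index * side + coord) 0

def encoded_taste_indices (dim : Int) (side : Int) (cell : Int × Int × Int) (logical_axis : Int) : Int × Int :=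
  let indices : List Int := [(0 : Int), 1].foldl (fun (acc : List Int) bit =>
    let eta := PySem.List.pySetD (List.replicate dim.toNat (0 : Int)) logical_axis bit
    let coords := (PySem.List.pyRange 0 dim 1).map
      (fun axis => 2 * cellGet cell axis + PySem.List.pyGetD eta axis 0)
    acc ++ [coordinate_index coords side]) []
  (PySem.List.pyGetD indices 0 0, PySem.List.pyGetD indices 1 0)

-- ===== PORT B =====
def encoded_taste_indices_alt (dim : Int) (side : Int) (cell : Int × Int × Int) (logical_axis : Int) : Int × Int :=
  let eta := PySem.List.pySetD (List.replicate dim.toNat (0 : Int)) logical_axis 1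
  let base := coordinate_index ((PySem.List.pyRange 0 dim 1).map (fun axis => 2 * cellGet cell axis)) side
  let delta := coordinate_index eta side
  (base, base + delta)

-- ===== PRECONDITION & SPEC =====
-- Pre_ excludes exactly the inputs on which the Python raises IndexError:
-- dim ≤ 0 (eta is empty) or dim > 3 (cell[axis] for axis ≥ 3) or logical_axis outside [-dim, dim).
def Pre_encoded_taste_indices (dim : Int) (side : Int) (cell : Int × Int × Int) (logical_axis : Int) : Prop :=
  1 ≤ dim ∧ dim ≤ 3 ∧ -dim ≤ logical_axis ∧ logical_axis < dim
instance (dim : Int) (side : Int) (cell : Int × Int × Int) (logical_axis : Int) : Decidable (Pre_encoded_taste_indices dim side cell logical_axis) := by unfold Pre_encoded_taste_indices; infer_instance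

def pvWitness_encoded_taste_indices : Int × Int × (Int × Int × Int) × Int := (3, 4, (1, 0, 2), 2)

def Spec_encoded_taste_indices (dim : Int) (side : Int) (cell : Int × Int × Int) (logical_axis : Int) (out : Int × Int) : Prop := out = encoded_taste_indices_alt dim side cell logical_axis
instance (dim : Int) (side : Int) (cell : Int × Int × Int) (logical_axis : Int) (out : Int × Int) : Decidable (Spec_encoded_taste_indices dim side cell logical_axis out) := by unfold Spec_encoded_taste_indices; infer_instance

-- ===== CLAIM (what is proved, stated in full; the proofs are below) =====
def Claim_equal_encoded_taste_indices : Prop := ∀ (dim : Int) (side : Int) (cell : Int × Int × Int) (logical_axis : Int), Dom_encoded_taste_indices dim side cell logical_axis → Pre_encoded_taste_indices dim side cell logical_axis → Spec_encoded_taste_indices dim side cell logical_axis (encoded_taste_indices dim side cell logical_axis)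

-- ===== LEMMAS AND PROOFS =====

-- ===== VERDICT (by name: the statement is the Claim_ definition above) =====
set_option maxHeartbeats 1000000 in
theorem encoded_taste_indices_spec : Claim_equal_encoded_taste_indices := by
  intro dim side cell logical_axis _ hpre
  obtain ⟨h1, h2, h3, h4⟩ := hpre
  rcases cell with ⟨c0, c1, c2⟩
  unfold Spec_encoded_taste_indices encoded_taste_indices encoded_taste_indices_alt
  interval_cases dim <;> interval_cases logical_axis <;>
    norm_num [coordinate_index, cellGet, PySem.List.pyGetD, PySem.List.pyGet?, PySem.List.pyIdx?,
      PySem.List.pySetD, PySem.List.pySet?, PySem.List.pyRange, List.replicate, List.set,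
      show Int.toNat 0 = 0 from rfl, show Int.toNat 1 = 1 from rfl,
      show Int.toNat 2 = 2 from rfl, show Int.toNat 3 = 3 from rfl,
      List.range_succ, Prod.ext_iff] <;>
    first
      | ring
      | (constructor <;> ring)
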